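-- pv_equiv track=rewrite | github.com/athornton3/capstone-data-processing | xmltopandas.py | key_pairs_to_dict
-- ===== SOURCE A (Python) =====
-- from collections import defaultdict
--
-- def key_pairs_to_dict(pairs, key_sep='-'):
--
--     out = {}
--
--     # group by key
--     key_map = defaultdict(list)
--     for key_parts, value in pairs:
--         key_map[key_sep.join(key_parts)].append(value)
--
--     # create dict
--     for key, values in key_map.items():
--         if len(values) == 1:  # No need to suffix keys.
--             out[key] = values[0]
--         else:  # More than one value for this key.
--             for suffix, value in enumerate(values, 1):
--                 out[f'{key}{key_sep}{suffix}'] = value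
--
--     return out
-- ===== SOURCE B (Python) =====
-- def key_pairs_to_dict(pairs, key_sep='-'):
--     # Partition-by-first-key: no grouping dict; repeatedly peel off the first
--     # remaining key's whole value group, then recurse on the rest.
--     keyed = [(key_sep.join(key_parts), value) for key_parts, value in pairs]
--     out = {}
--     while keyed:
--         k = keyed[0][0]
--         values = [v for key, v in keyed if key == k]
--         if len(values) == 1:
--             out[k] = values[0]
--         else:
--             for i, v in enumerate(values, 1):
--                 out[f'{k}{key_sep}{i}'] = v
--         keyed = [(key, v) for key, v in keyed if key != k]
--     return out
-- ===== Notes on version B (the rewrite author's own statement) =====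
-- stated objective: alternative
-- what changed: Replaces A's defaultdict grouping pass plus items() iteration by a partition loop that repeatedly takes the first remaining key, extracts its whole value group by filtering, emits it, and drops those pairs from the worklist (no intermediate key->values map is built).
import Mathlib
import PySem

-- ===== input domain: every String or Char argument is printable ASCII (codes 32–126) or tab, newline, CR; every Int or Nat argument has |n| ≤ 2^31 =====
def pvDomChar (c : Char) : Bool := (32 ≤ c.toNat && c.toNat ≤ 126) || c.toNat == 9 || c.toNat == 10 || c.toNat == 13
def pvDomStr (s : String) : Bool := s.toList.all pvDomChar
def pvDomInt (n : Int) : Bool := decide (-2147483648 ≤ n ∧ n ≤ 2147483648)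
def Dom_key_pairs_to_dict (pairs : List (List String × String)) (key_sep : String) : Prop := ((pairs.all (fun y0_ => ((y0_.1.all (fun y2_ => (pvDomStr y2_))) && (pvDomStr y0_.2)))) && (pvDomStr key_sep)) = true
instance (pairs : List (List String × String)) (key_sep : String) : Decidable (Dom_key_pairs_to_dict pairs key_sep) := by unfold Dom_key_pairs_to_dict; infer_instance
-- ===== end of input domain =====

-- B replaces A's defaultdict-grouping pass + items() pass by a partition loop on the first remaining key (no intermediate key->values map); same return value, no speed claim.


-- ===== PORT A =====
-- defaultdict(list) grouping pass, then the dict-building pass over key_map.items().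
-- values[0] is ported as headD "" — the surrounding branch guarantees length 1, so the
-- default is never read (Python's values[0] raises only on an empty list, unreachable here).
def key_pairs_to_dict (pairs : List (List String × String)) (key_sep : String) : List (String × String) :=
  let key_map : PySem.Dict String (List String) :=
    pairs.foldl (fun d p => d.modify (PySem.Str.join key_sep p.1) [] (fun x => x ++ [p.2])) PySem.Dict.empty
  let out : PySem.Dict String String :=
    key_map.items.foldl (fun o kv =>
      if kv.2.length = 1 then
        o.insert kv.1 (kv.2.headD "")
      else
        (PySem.List.enumerate kv.2 1).foldl
          (fun o sv => o.insert (kv.1 ++ key_sep ++ PySem.Int.toStr sv.1) sv.2) o) PySem.Dict.empty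
  out.items

-- ===== PORT B =====
-- the while loop of Source B: peel off the first remaining key's whole group (values[0] → headD ""
-- under the same length-1 guard as in port A), emit it, loop on the pairs with other keys
def pvBLoop (key_sep : String) (keyed : List (String × String)) (out : PySem.Dict String String) : PySem.Dict String String :=
  match keyed with
  | [] => out
  | (k, v) :: t =>
    let values := (((k, v) :: t).filter (fun p => p.1 == k)).map (fun p => p.2)
    let out' :=
      if values.length = 1 then
        out.insert k (values.headD "")
      else
        (PySem.List.enumerate values 1).foldl
          (fun o sv => o.insert (k ++ key_sep ++ PySem.Int.toStr sv.1) sv.2) out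
    pvBLoop key_sep (((k, v) :: t).filter (fun p => p.1 != k)) out'
termination_by keyed.length
decreasing_by
  simp only [List.filter_cons, bne_self_eq_false, Bool.false_eq_true, if_false, List.length_cons]
  exact Nat.lt_succ_of_le (List.length_filter_le _ _)

def key_pairs_to_dict_alt (pairs : List (List String × String)) (key_sep : String) : List (String × String) :=
  let keyed := pairs.map (fun p => (PySem.Str.join key_sep p.1, p.2))
  (pvBLoop key_sep keyed PySem.Dict.empty).items

-- ===== PRECONDITION & SPEC =====
def Spec_key_pairs_to_dict (pairs : List (List String × String)) (key_sep : String) (out : List (String × String)) : Prop := out = key_pairs_to_dict_alt pairs key_sep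
instance (pairs : List (List String × String)) (key_sep : String) (out : List (String × String)) : Decidable (Spec_key_pairs_to_dict pairs key_sep out) := by unfold Spec_key_pairs_to_dict; infer_instance

-- ===== CLAIM (what is proved, stated in full; the proofs are below) =====
def Claim_equal_key_pairs_to_dict : Prop := ∀ (pairs : List (List String × String)) (key_sep : String), Dom_key_pairs_to_dict pairs key_sep → Spec_key_pairs_to_dict pairs key_sep (key_pairs_to_dict pairs key_sep)

-- ===== LEMMAS AND PROOFS =====

-- a dict with Nodup keys is its key list decorated with the looked-up values
theorem pv_items_eq_keys_map {ν : Type} (d : PySem.Dict String ν) (d0 : ν) (h : d.keys.Nodup) :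
    d.items = d.keys.map (fun k => (k, d.getD k d0)) := by
  simp only [PySem.Dict.keys, List.map_map]
  conv_lhs => rw [← List.map_id d.items]
  refine (List.map_congr_left ?_).symm
  intro p hp
  have : d.getD p.1 d0 = p.2 := PySem.Dict.getD_of_mem_items d (by simpa using hp) h d0
  simp [Function.comp, this]

-- set(xs) with one element discarded is the set of the filtered list
theorem pv_discard_ofList (xs : List String) (a : String) :
    (PySem.Set.ofList xs).discard a = PySem.Set.ofList (xs.filter (fun x => x != a)) := by
  induction xs with
  | nil => rfl
  | cons x t ih =>
    rw [PySem.Set.ofList_cons, List.filter_cons]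
    by_cases hxa : x = a
    · subst hxa
      simp only [bne_self_eq_false, Bool.false_eq_true, if_false, PySem.Set.discard,
        List.filter_cons, beq_self_eq_true, Bool.not_true, List.filter_filter]
      rw [← ih]
      simp only [PySem.Set.discard]
      exact List.filter_congr (fun b _ => by cases h : (b == x) <;> simp)
    · have hbeq : (x == a) = false := by simp [hxa]
      have hbne : (x != a) = true := by simp [bne, hbeq]
      rw [hbne, if_pos rfl, PySem.Set.ofList_cons, ← ih]
      simp only [PySem.Set.discard, List.filter_cons, hbeq, Bool.not_false, List.filter_filter]
      refine congrArg (x :: ·) ?_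
      exact List.filter_congr (fun b _ => by cases h1 : (b == x) <;> cases h2 : (b == a) <;> simp)

-- the crux: A's fold over the grouped (key, values) list equals B's partition loop
theorem pv_main (key_sep : String) (ks : List (String × String)) (o : PySem.Dict String String) :
    ((PySem.Set.ofList (ks.map (fun p => p.1))).map
        (fun c => (c, (ks.filter (fun p => p.1 == c)).map (fun p => p.2)))).foldl
      (fun o kv =>
        if kv.2.length = 1 then o.insert kv.1 (kv.2.headD "")
        else (PySem.List.enumerate kv.2 1).foldl
          (fun o sv => o.insert (kv.1 ++ key_sep ++ PySem.Int.toStr sv.1) sv.2) o) o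
    = pvBLoop key_sep ks o := by
  match ks with
  | [] => rw [pvBLoop]; rfl
  | (k, v) :: t =>
    rw [pvBLoop]
    rw [show ((k,v) :: t).map (fun p => p.1) = k :: t.map (fun p => p.1) from rfl,
        PySem.Set.ofList_cons, pv_discard_ofList, List.filter_map,
        show ((fun x => x != k) ∘ (fun (p : String × String) => p.1)) = (fun (p : String × String) => p.1 != k) from rfl]
    rw [List.map_cons, List.foldl_cons]
    have hks : (((k,v) :: t).filter (fun p => p.1 != k)) = t.filter (fun p => p.1 != k) := by
      simp
    have htail : (PySem.Set.ofList ((t.filter (fun p => p.1 != k)).map (fun p => p.1))).map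
          (fun c => (c, (((k,v) :: t).filter (fun p => p.1 == c)).map (fun p => p.2)))
        = (PySem.Set.ofList ((t.filter (fun p => p.1 != k)).map (fun p => p.1))).map
          (fun c => (c, ((((k,v) :: t).filter (fun p => p.1 != k)).filter (fun p => p.1 == c)).map (fun p => p.2))) := by
      apply List.map_congr_left
      intro c hc
      have hck : c ≠ k := by
        rw [PySem.Set.mem_ofList] at hc
        obtain ⟨p, hp, rfl⟩ := List.mem_map.mp hc
        have := (List.mem_filter.mp hp).2
        simpa [bne] using this
      have : (((k,v) :: t).filter (fun p => p.1 != k)).filter (fun p => p.1 == c)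
          = ((k,v) :: t).filter (fun p => p.1 == c) := by
        rw [List.filter_filter]
        apply List.filter_congr
        intro p _
        cases hpc : (p.1 == c)
        · simp
        · have hp1 : p.1 = c := by simpa using hpc
          have hk : (p.1 == k) = false := by simp [hp1, hck]
          simp [bne, hk]
      rw [this]
    rw [htail, hks]
    have ih := pv_main key_sep (t.filter (fun p => p.1 != k)) ((fun o (kv : String × List String) =>
        if kv.2.length = 1 then o.insert kv.1 (kv.2.headD "")
        else (PySem.List.enumerate kv.2 1).foldl
          (fun o sv => o.insert (kv.1 ++ key_sep ++ PySem.Int.toStr sv.1) sv.2) o) o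
        (k, (((k,v) :: t).filter (fun p => p.1 == k)).map (fun p => p.2)))
    rw [← hks] at ih ⊢
    exact ih
termination_by ks.length
decreasing_by
  simp only [List.length_cons]
  exact Nat.lt_succ_of_le (List.length_filter_le _ _)

-- ===== VERDICT (by name: the statement is the Claim_ definition above) =====
theorem key_pairs_to_dict_spec : Claim_equal_key_pairs_to_dict := by
  intro pairs key_sep _
  show key_pairs_to_dict pairs key_sep = key_pairs_to_dict_alt pairs key_sep
  unfold key_pairs_to_dict key_pairs_to_dict_alt
  set ks := pairs.map (fun p => (PySem.Str.join key_sep p.1, p.2)) with hksdef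
  have hfold : pairs.foldl (fun d p => d.modify (PySem.Str.join key_sep p.1) [] (fun x => x ++ [p.2])) PySem.Dict.empty
      = ks.foldl (fun d p => d.modify p.1 [] (fun x => x ++ [p.2])) PySem.Dict.empty := by
    rw [hksdef, List.foldl_map]
  have hnodup : (ks.foldl (fun d p => d.modify p.1 [] (fun x => x ++ [p.2])) PySem.Dict.empty).keys.Nodup := by
    have := PySem.Dict.nodup_keys_foldl_modify_key ks (fun p : String × String => p.1)
      ([] : List String) (fun _ p => fun x => x ++ [p.2]) PySem.Dict.empty (by simp)
    simpa using this
  have hkeys : (ks.foldl (fun d p => d.modify p.1 [] (fun x => x ++ [p.2])) PySem.Dict.empty).keys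
      = PySem.Set.ofList (ks.map (fun p => p.1)) := by
    have := PySem.Dict.keys_foldl_modify_key ks (fun p : String × String => p.1)
      ([] : List String) (fun _ p => fun x => x ++ [p.2]) PySem.Dict.empty
    simp only [PySem.Dict.keys_empty] at this
    rw [PySem.Set.ofList_eq_foldl]
    simpa [PySem.Set.update] using this
  have hitems : (ks.foldl (fun d p => d.modify p.1 [] (fun x => x ++ [p.2])) PySem.Dict.empty).items
      = (PySem.Set.ofList (ks.map (fun p => p.1))).map
          (fun c => (c, (ks.filter (fun p => p.1 == c)).map (fun p => p.2))) := by
    rw [pv_items_eq_keys_map _ ([] : List String) hnodup, hkeys]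
    apply List.map_congr_left
    intro c _
    have := PySem.Dict.getD_foldl_modify_append ks PySem.Dict.empty c
    simp only [PySem.Dict.getD_empty, List.nil_append] at this
    rw [this]
  simp only [hfold, hitems]
  rw [pv_main]
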